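-- pv_equiv track=rewrite | github.com/bartagoitia1977/PROJETO-P1-2017.2-UFPE | CORE_PROJECT_PTBR.py | ELEISSON
-- ===== SOURCE A (Python) =====
-- def ELEISSON(DIC3):
--     JN = []
--     jupla = ""
--     for us in DIC3.keys():
--         JN.append(us)
--         jupla = DIC3[us]
--         for xiz in jupla:
--             JN.append(xiz)
--     STRONG = ""
--     SS = 0
--     for wd in JN:
--         for lt in wd:
--             SS = ((ord(lt)) + 37)
--             STRONG += str(SS)
--             STRONG += " "
--         STRONG += "291"
--         STRONG += " "
--
--     return (STRONG)
-- ===== SOURCE B (Python) =====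
-- def ELEISSON(DIC3):
--     pieces = []
--     for key, vals in DIC3.items():
--         for ch in key:
--             pieces.append(str(ord(ch) + 37) + " ")
--         pieces.append("291 ")
--         for el in vals:
--             for ch in el:
--                 pieces.append(str(ord(ch) + 37) + " ")
--             pieces.append("291 ")
--     return "".join(pieces)
-- ===== Notes on version B (the rewrite author's own statement) =====
-- stated objective: simpler
-- what changed: Drops the intermediate JN word list entirely: one pass over DIC3.items() emits the encoded pieces directly and the result is a single ''.join, instead of A's two-phase build-list-then-re-scan with repeated string concatenation.
import Mathlib
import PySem

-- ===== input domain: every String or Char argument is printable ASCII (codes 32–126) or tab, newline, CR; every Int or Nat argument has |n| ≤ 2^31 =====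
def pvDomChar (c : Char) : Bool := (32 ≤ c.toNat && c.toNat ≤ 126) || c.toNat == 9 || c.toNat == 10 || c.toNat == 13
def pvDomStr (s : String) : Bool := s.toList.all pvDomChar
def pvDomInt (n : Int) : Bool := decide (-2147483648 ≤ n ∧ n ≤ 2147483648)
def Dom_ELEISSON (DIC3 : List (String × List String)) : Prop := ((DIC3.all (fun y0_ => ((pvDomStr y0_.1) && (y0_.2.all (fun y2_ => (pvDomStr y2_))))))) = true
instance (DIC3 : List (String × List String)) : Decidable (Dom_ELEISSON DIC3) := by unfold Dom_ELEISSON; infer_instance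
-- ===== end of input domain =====

-- B drops A's intermediate JN word list: one pass over the items emits encoded pieces
-- directly and joins them once (objective: simpler decomposition).


-- ===== PORT A =====
-- literal transliteration of A: first build the word list JN (key, then each value
-- element), then encode every word character by character into STRONG with `+=`.
def ELEISSON (DIC3 : List (String × List String)) : String :=
  let JN : List String := DIC3.foldl (fun jn p => (jn ++ [p.1]) ++ p.2) []
  let STRONG : String := JN.foldl (fun s wd =>
    ((wd.toList.foldl (fun s lt => (s ++ PySem.Int.toStr ((lt.toNat : Int) + 37)) ++ " ") s)
      ++ "291") ++ " ") ""
  STRONG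

-- ===== PORT B =====
-- for ch in word: pieces.append(str(ord(ch)+37)+" ")
def pvEncWord (w : String) : List String :=
  w.toList.map (fun c => PySem.Int.toStr ((c.toNat : Int) + 37) ++ " ")

def ELEISSON_alt (DIC3 : List (String × List String)) : String :=
  let pieces : List String := DIC3.foldl (fun acc p =>
    p.2.foldl (fun a el => (a ++ pvEncWord el) ++ ["291 "])
      ((acc ++ pvEncWord p.1) ++ ["291 "])) []
  String.join pieces

-- ===== PRECONDITION & SPEC =====
def Spec_ELEISSON (DIC3 : List (String × List String)) (out : String) : Prop := out = ELEISSON_alt DIC3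
instance (DIC3 : List (String × List String)) (out : String) : Decidable (Spec_ELEISSON DIC3 out) := by unfold Spec_ELEISSON; infer_instance

-- ===== CLAIM (what is proved, stated in full; the proofs are below) =====
def Claim_equal_ELEISSON : Prop := ∀ (DIC3 : List (String × List String)), Dom_ELEISSON DIC3 → Spec_ELEISSON DIC3 (ELEISSON DIC3)

-- ===== LEMMAS AND PROOFS =====

theorem pvJoin_cons (x : String) (l : List String) :
    String.join (x :: l) = x ++ String.join l := by
  suffices h : ∀ (l : List String) (x : String),
      List.foldl (fun r s => r ++ s) x l = x ++ List.foldl (fun r s => r ++ s) "" l by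
    simpa [String.join] using h l x
  intro l
  induction l with
  | nil => intro x; simp
  | cons y ys ih =>
      intro x
      simp only [List.foldl_cons]
      rw [ih (x ++ y), ih ("" ++ y), String.append_assoc]
      simp

theorem pvJoin_append (l m : List String) :
    String.join (l ++ m) = String.join l ++ String.join m := by
  induction l with
  | nil => simp [String.join]
  | cons x xs ih => simp only [List.cons_append, pvJoin_cons, ih, String.append_assoc]

-- joined encoding of one word followed by its terminator
def pvWStr (w : String) : String := String.join (pvEncWord w) ++ "291 "

theorem pvChars_fold (l : List Char) (s : String) :
    l.foldl (fun s lt => (s ++ PySem.Int.toStr ((lt.toNat : Int) + 37)) ++ " ") s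
      = s ++ String.join (l.map (fun c => PySem.Int.toStr ((c.toNat : Int) + 37) ++ " ")) := by
  induction l generalizing s with
  | nil => simp [String.join]
  | cons c cs ih =>
      rw [List.foldl_cons, ih, List.map_cons, pvJoin_cons]
      simp [String.append_assoc]

theorem pvWords_fold (ws : List String) (s : String) :
    ws.foldl (fun s wd =>
      ((wd.toList.foldl (fun s lt => (s ++ PySem.Int.toStr ((lt.toNat : Int) + 37)) ++ " ") s)
        ++ "291") ++ " ") s
      = s ++ String.join (ws.map pvWStr) := by
  induction ws generalizing s with
  | nil => simp [String.join]
  | cons w rest ih =>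
      rw [List.foldl_cons, ih, List.map_cons, pvJoin_cons, pvChars_fold]
      have h : ("291" : String) ++ " " = "291 " := rfl
      simp only [pvWStr, pvEncWord, ← h, String.append_assoc]

theorem pvJN_fold (DIC3 : List (String × List String)) (jn : List String) :
    DIC3.foldl (fun jn p => (jn ++ [p.1]) ++ p.2) jn
      = jn ++ DIC3.flatMap (fun p => p.1 :: p.2) := by
  induction DIC3 generalizing jn with
  | nil => simp
  | cons p rest ih => simp [List.flatMap, List.append_assoc]

theorem pvBOuter_fold (DIC3 : List (String × List String)) (acc : List String) :
    DIC3.foldl (fun acc p =>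
      p.2.foldl (fun a el => (a ++ pvEncWord el) ++ ["291 "])
        ((acc ++ pvEncWord p.1) ++ ["291 "])) acc
      = acc ++ DIC3.flatMap (fun p =>
          (pvEncWord p.1 ++ ["291 "]) ++ p.2.flatMap (fun el => pvEncWord el ++ ["291 "])) := by
  induction DIC3 generalizing acc with
  | nil => simp
  | cons p rest ih => simp [List.flatMap, List.append_assoc]

theorem pvJoin_inner (vals : List String) :
    String.join (vals.flatMap (fun el => pvEncWord el ++ ["291 "]))
      = String.join (vals.map pvWStr) := by
  induction vals with
  | nil => rfl
  | cons v rest ih =>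
      simp only [List.flatMap_cons, List.map_cons, pvJoin_append, pvJoin_cons, ih, pvWStr]
      simp [String.join, String.append_assoc]

theorem pvJoin_main (DIC3 : List (String × List String)) :
    String.join ((DIC3.flatMap (fun p => p.1 :: p.2)).map pvWStr)
      = String.join (DIC3.flatMap (fun p =>
          (pvEncWord p.1 ++ ["291 "]) ++ p.2.flatMap (fun el => pvEncWord el ++ ["291 "]))) := by
  induction DIC3 with
  | nil => rfl
  | cons p rest ih =>
      simp only [List.flatMap_cons, List.map_append, List.map_cons, pvJoin_append,
        pvJoin_cons, ih, pvJoin_inner, pvWStr]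
      simp [String.join, String.append_assoc]

-- ===== VERDICT (by name: the statement is the Claim_ definition above) =====
theorem ELEISSON_spec : Claim_equal_ELEISSON := by
  intro DIC3 _
  unfold Spec_ELEISSON ELEISSON ELEISSON_alt
  simp only [pvJN_fold, pvBOuter_fold, pvWords_fold, List.nil_append]
  exact pvJoin_main DIC3
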